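-- pv_equiv track=rewrite | github.com/WideSu/serenRec | seren/utils/functions.py | build_seqs
-- ===== SOURCE A (Python) =====
-- def build_seqs(seqs, max_len):
--     user_seqs, targets, sess = [], [], []
--     for seq in seqs:
--         s_id = seq[0]
--         items = seq[1]
--         tmp_len = len(items) if len(items) <= max_len else max_len
--         for j in range(tmp_len - 1):
--             targets.append([items[j + 1]])
--             user_seq = items[0:j + 1]
--             user_seqs.append(user_seq)
--             sess.append(s_id)
--
--         if len(items) > max_len:
--             for j in range(max_len, len(items)):
--                 targets.append([items[j]])
--                 user_seq = items[j - max_len + 1:j]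
--                 user_seqs.append(user_seq)
--                 sess.append(s_id)
--
--     return user_seqs, targets, sess
-- ===== SOURCE B (Python) =====
-- def build_seqs(seqs, max_len):
--     # Incremental bounded-window pass: carry the current input window along the
--     # session instead of re-slicing items for every target position.
--     # A non-positive max_len yields no training pairs.
--     user_seqs, targets, sess = [], [], []
--     if max_len <= 0:
--         return user_seqs, targets, sess
--     for s_id, items in seqs:
--         window = items[:1] if max_len > 1 else []
--         for item in items[1:]:
--             user_seqs.append(window)
--             targets.append([item])
--             sess.append(s_id)
--             window = window + [item]
--             if len(window) >= max_len:
--                 window = window[1:]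
--     return user_seqs, targets, sess
-- ===== Notes on version B (the rewrite author's own statement) =====
-- stated objective: alternative
-- what changed: Instead of A's two staged slicing loops per session (prefixes, then conditional sliding windows), B carries the current input window incrementally along a single pass over the session's items (append the new item, drop the front once the window is full), never re-slicing the item list.
-- intended difference: For max_len <= 0 with some nonempty session, A returns len(items)-max_len pairs per session whose inputs are all empty and whose targets come from wrapped negative indexing, an artefact of running the window loop from a negative start; B returns no pairs, the intended behaviour for a non-positive window length. — e.g. on build_seqs([(5, [1, 2])], 0): A returns ([[], []], [[1], [2]], [5, 5]), B returns ([], [], [])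
import Mathlib
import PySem

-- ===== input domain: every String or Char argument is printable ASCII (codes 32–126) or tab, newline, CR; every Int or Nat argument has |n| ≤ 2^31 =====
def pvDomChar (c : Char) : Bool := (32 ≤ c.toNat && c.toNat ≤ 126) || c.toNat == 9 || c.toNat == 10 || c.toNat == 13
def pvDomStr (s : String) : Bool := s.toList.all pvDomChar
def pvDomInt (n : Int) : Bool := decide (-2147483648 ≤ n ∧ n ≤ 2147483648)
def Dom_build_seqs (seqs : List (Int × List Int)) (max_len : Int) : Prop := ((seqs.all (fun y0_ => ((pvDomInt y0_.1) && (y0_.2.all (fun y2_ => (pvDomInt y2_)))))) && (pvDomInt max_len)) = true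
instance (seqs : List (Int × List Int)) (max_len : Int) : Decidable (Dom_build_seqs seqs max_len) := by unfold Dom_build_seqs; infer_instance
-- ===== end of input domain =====

-- B replaces A's two staged slicing loops per session by a single pass that maintains the
-- bounded input window incrementally (objective: alternative decomposition, same cost).

-- ===== PORT A =====
-- one iteration of A's outer 'for seq in seqs' loop
def pvStepA (max_len : Int) (acc : List (List Int) × List (List Int) × List Int)
    (seq : Int × List Int) : List (List Int) × List (List Int) × List Int :=
  let s_id := seq.1
  let items := seq.2
  let tmp_len : Int := if (items.length : Int) ≤ max_len then (items.length : Int) else max_len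
  let acc1 := (PySem.List.pyRange 0 (tmp_len - 1) 1).foldl (fun acc j =>
      (acc.1 ++ [PySem.List.slice items (some 0) (some (j + 1))],
       acc.2.1 ++ [[PySem.List.pyGetD items (j + 1) 0]],
       acc.2.2 ++ [s_id])) acc
  if max_len < (items.length : Int) then
    (PySem.List.pyRange max_len (items.length : Int) 1).foldl (fun acc j =>
      (acc.1 ++ [PySem.List.slice items (some (j - max_len + 1)) (some j)],
       acc.2.1 ++ [[PySem.List.pyGetD items j 0]],
       acc.2.2 ++ [s_id])) acc1
  else acc1

def build_seqs (seqs : List (Int × List Int)) (max_len : Int) :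
    List (List Int) × List (List Int) × List Int :=
  seqs.foldl (pvStepA max_len) ([], [], [])

-- ===== PORT B =====
-- one iteration of B's outer loop: walk items[1:] carrying the current window
def pvStepB (max_len : Int) (acc : List (List Int) × List (List Int) × List Int)
    (seq : Int × List Int) : List (List Int) × List (List Int) × List Int :=
  let s_id := seq.1
  let items := seq.2
  let w0 : List Int := if 1 < max_len then PySem.List.slice items none (some 1) else []
  ((PySem.List.slice items (some 1) none).foldl
    (fun (st : List Int × (List (List Int) × List (List Int) × List Int)) item =>
      let acc := (st.2.1 ++ [st.1], st.2.2.1 ++ [[item]], st.2.2.2 ++ [s_id])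
      let w := st.1 ++ [item]
      let w := if max_len ≤ (w.length : Int) then PySem.List.slice w (some 1) none else w
      (w, acc)) (w0, acc)).2

def build_seqs_alt (seqs : List (Int × List Int)) (max_len : Int) :
    List (List Int) × List (List Int) × List Int :=
  if max_len ≤ 0 then ([], [], [])
  else seqs.foldl (pvStepB max_len) ([], [], [])

-- ===== PRECONDITION & SPEC =====
-- Pre_ excludes exactly the inputs on which Python A raises IndexError:
-- some session has max_len < -len(items), so its window loop indexes items[j] with j < -len(items).
def Pre_build_seqs (seqs : List (Int × List Int)) (max_len : Int) : Prop :=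
  ∀ p ∈ seqs, -((p.2.length : Int)) ≤ max_len
instance (seqs : List (Int × List Int)) (max_len : Int) : Decidable (Pre_build_seqs seqs max_len) := by
  unfold Pre_build_seqs; infer_instance

def pvWitness_build_seqs : (List (Int × List Int)) × Int := ([(7, [1, 2, 3, 4])], 2)

-- For max_len <= 0 with some nonempty session, A returns len(items)-max_len pairs per session whose
-- inputs are all empty and whose targets come from wrapped negative indexing (an artefact of running
-- the window loop from a negative start); B returns no pairs, the intended behaviour for a
-- non-positive window length.
def D_build_seqs (seqs : List (Int × List Int)) (max_len : Int) : Prop :=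
  max_len ≤ 0 ∧ ∃ p ∈ seqs, p.2 ≠ []
instance (seqs : List (Int × List Int)) (max_len : Int) : Decidable (D_build_seqs seqs max_len) := by
  unfold D_build_seqs; infer_instance

def Spec_build_seqs (seqs : List (Int × List Int)) (max_len : Int)
    (out : List (List Int) × List (List Int) × List Int) : Prop :=
  ¬ D_build_seqs seqs max_len → out = build_seqs_alt seqs max_len
instance (seqs : List (Int × List Int)) (max_len : Int) (out : List (List Int) × List (List Int) × List Int) : Decidable (Spec_build_seqs seqs max_len out) := by unfold Spec_build_seqs; infer_instance

def pvDiffWitness_build_seqs : (List (Int × List Int)) × Int := ([(5, [1, 2])], 0)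
def pvDiffWitnessOut_build_seqs :
    (List (List Int) × List (List Int) × List Int) × (List (List Int) × List (List Int) × List Int) :=
  (([[], []], [[1], [2]], [5, 5]), ([], [], []))

-- ===== CLAIM (what is proved, stated in full; the proofs are below) =====
def Claim_unchanged_build_seqs : Prop := ∀ (seqs : List (Int × List Int)) (max_len : Int), Dom_build_seqs seqs max_len → Pre_build_seqs seqs max_len → Spec_build_seqs seqs max_len (build_seqs seqs max_len)
def Claim_changed_build_seqs : Prop := Dom_build_seqs (pvDiffWitness_build_seqs.1) (pvDiffWitness_build_seqs.2) ∧ Pre_build_seqs (pvDiffWitness_build_seqs.1) (pvDiffWitness_build_seqs.2) ∧ D_build_seqs (pvDiffWitness_build_seqs.1) (pvDiffWitness_build_seqs.2) ∧ build_seqs (pvDiffWitness_build_seqs.1) (pvDiffWitness_build_seqs.2) = pvDiffWitnessOut_build_seqs.1 ∧ build_seqs_alt (pvDiffWitness_build_seqs.1) (pvDiffWitness_build_seqs.2) = pvDiffWitnessOut_build_seqs.2 ∧ pvDiffWitnessOut_build_seqs.1 ≠ pvDiffWitnessOut_build_seqs.2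
def Claim_exact_build_seqs : Prop := ∀ (seqs : List (Int × List Int)) (max_len : Int), Dom_build_seqs seqs max_len → Pre_build_seqs seqs max_len → D_build_seqs seqs max_len → build_seqs seqs max_len ≠ build_seqs_alt seqs max_len

-- ===== LEMMAS AND PROOFS =====

-- a fold appending one element to each component of a triple is an append of three maps
theorem pvFoldTriple {α : Type} (l : List α) (F G : α → List Int) (s : α → Int)
    (acc : List (List Int) × List (List Int) × List Int) :
    l.foldl (fun acc x => (acc.1 ++ [F x], acc.2.1 ++ [G x], acc.2.2 ++ [s x])) acc
      = (acc.1 ++ l.map F, acc.2.1 ++ l.map G, acc.2.2 ++ l.map s) := by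
  induction l generalizing acc with
  | nil => simp
  | cons y ys ih => simp [List.foldl_cons, ih]

-- reindexing: mapping f over j+1 on range a..b is mapping f on range (a+1)..(b+1)
theorem pvMapShift {γ : Type} (a b : Int) (f : Int → γ) :
    (PySem.List.pyRange a b 1).map (fun j => f (j + 1))
      = (PySem.List.pyRange (a + 1) (b + 1) 1).map f := by
  rw [PySem.List.pyRange_one, PySem.List.pyRange_one]
  have h : (b + 1 - (a + 1)).toNat = (b - a).toNat := by omega
  rw [h, List.map_map, List.map_map]
  refine List.map_congr_left ?_
  intro k _
  simp only [Function.comp]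
  congr 1
  omega

-- A's two per-session chunks, fused: maps over target positions 1..len-1 (for 1 ≤ max_len)
theorem pvKeyA {γ : Type} (max_len : Int) (hml : 1 ≤ max_len) (items : List Int) (f : Int → Int → γ) :
    (PySem.List.pyRange 0 ((if (items.length : Int) ≤ max_len then (items.length : Int) else max_len) - 1) 1).map
        (fun j => f 0 (j + 1))
      ++ (if max_len < (items.length : Int) then
            (PySem.List.pyRange max_len (items.length : Int) 1).map (fun j => f (j - max_len + 1) j)
          else [])
      = (PySem.List.pyRange 1 (items.length : Int) 1).map
          (fun t => f (max 0 (t - max_len + 1)) t) := by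
  set n : Int := (items.length : Int) with hn
  have hn0 : 0 ≤ n := by simp [hn]
  by_cases hle : n ≤ max_len
  · rw [if_pos hle, if_neg (by omega), pvMapShift, List.append_nil]
    have h1 : (0 : Int) + 1 = 1 := by ring
    have h2 : n - 1 + 1 = n := by ring
    rw [h1, h2]
    refine List.map_congr_left ?_
    intro t ht
    rw [PySem.List.mem_pyRange_one] at ht
    have hmax : max 0 (t - max_len + 1) = 0 := by omega
    simp only [hmax]
  · rw [if_neg hle, if_pos (by omega), pvMapShift]
    have h1 : (0 : Int) + 1 = 1 := by ring
    have h2 : max_len - 1 + 1 = max_len := by ring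
    rw [h1, h2]
    rw [PySem.List.pyRange_one_append 1 max_len n (by omega) (by omega), List.map_append]
    congr 1
    · refine List.map_congr_left ?_
      intro t ht
      rw [PySem.List.mem_pyRange_one] at ht
      have hmax : max 0 (t - max_len + 1) = 0 := by omega
      simp only [hmax]
    · refine List.map_congr_left ?_
      intro t ht
      rw [PySem.List.mem_pyRange_one] at ht
      have hmax : max 0 (t - max_len + 1) = t - max_len + 1 := by omega
      simp only [hmax]

-- the window B carries just before emitting the pair for target position t
def pvWin (items : List Int) (max_len : Int) (t : Nat) : List Int :=
  (items.drop (t - (max_len.toNat - 1))).take (t - (t - (max_len.toNat - 1)))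

-- B's window is A's slice
theorem pvWin_eq_slice (items : List Int) (max_len : Int) (hml : 1 ≤ max_len) (t : Nat) :
    pvWin items max_len t
      = PySem.List.slice items (some (max 0 ((t : Int) - max_len + 1))) (some (t : Int)) := by
  rw [PySem.List.slice_toNat items (by omega) (by omega)]
  unfold pvWin
  have h1 : (max 0 ((t : Int) - max_len + 1)).toNat = t - (max_len.toNat - 1) := by omega
  have h2 : ((t : Int)).toNat = t := by omega
  rw [h1, h2]

-- B's window invariant: folding the suffix from target position t produces the fused maps
theorem pvInnerB (max_len : Int) (hml : 1 ≤ max_len) (s_id : Int) (items : List Int) :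
    ∀ (suf : List Int) (t : Nat) (acc : List (List Int) × List (List Int) × List Int),
      1 ≤ t → items.drop t = suf →
      (suf.foldl
        (fun (st : List Int × (List (List Int) × List (List Int) × List Int)) item =>
          let acc := (st.2.1 ++ [st.1], st.2.2.1 ++ [[item]], st.2.2.2 ++ [s_id])
          let w := st.1 ++ [item]
          let w := if max_len ≤ (w.length : Int) then PySem.List.slice w (some 1) none else w
          (w, acc)) (pvWin items max_len t, acc)).2
        = (acc.1 ++ (PySem.List.pyRange (t : Int) (items.length : Int) 1).map
              (fun u => PySem.List.slice items (some (max 0 (u - max_len + 1))) (some u)),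
           acc.2.1 ++ (PySem.List.pyRange (t : Int) (items.length : Int) 1).map
              (fun u => [PySem.List.pyGetD items u 0]),
           acc.2.2 ++ (PySem.List.pyRange (t : Int) (items.length : Int) 1).map
              (fun _ => s_id)) := by
  intro suf
  induction suf with
  | nil =>
    intro t acc ht hdrop
    have hlen : items.length ≤ t := by
      by_contra h
      have := congrArg List.length hdrop
      simp [List.length_drop] at this
      omega
    rw [PySem.List.pyRange_one_eq_nil (by omega)]
    simp
  | cons x rest ih =>
    intro t acc ht hdrop
    have htlt : t < items.length := by
      by_contra h
      rw [List.drop_eq_nil_of_le (by omega)] at hdrop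
      exact List.cons_ne_nil x rest hdrop.symm
    have hget : items[t] = x := by
      have h0 : (items.drop t)[0]? = some x := by rw [hdrop]; rfl
      rw [List.getElem?_drop] at h0
      simp only [Nat.add_zero] at h0
      exact (List.getElem?_eq_some_iff.mp h0).2
    have hdrop1 : items.drop (t + 1) = rest := by
      have : items.drop (t + 1) = (items.drop t).drop 1 := by
        rw [List.drop_drop]
      rw [this, hdrop]
      simp
    -- unfold one fold step
    rw [List.foldl_cons]
    -- the updated window is pvWin at t+1
    have hm1 : 1 ≤ max_len.toNat := by omega
    have hwin1 : pvWin items max_len t ++ [x] = (items.drop (t - (max_len.toNat - 1))).take (t + 1 - (t - (max_len.toNat - 1))) := by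
      unfold pvWin
      have hk : t - (max_len.toNat - 1) ≤ t := by omega
      have hdidx : (items.drop (t - (max_len.toNat - 1)))[t - (t - (max_len.toNat - 1))]? = some x := by
        rw [List.getElem?_drop]
        have : t - (max_len.toNat - 1) + (t - (t - (max_len.toNat - 1))) = t := by omega
        rw [this]
        simp [hget, htlt]
      have htake : t + 1 - (t - (max_len.toNat - 1)) = (t - (t - (max_len.toNat - 1))) + 1 := by omega
      rw [htake, List.take_add_one, hdidx]
      simp
    have hlenw : (pvWin items max_len t ++ [x]).length = min (t + 1) max_len.toNat := by
      rw [hwin1]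
      simp [List.length_take, List.length_drop]
      omega
    have hwinstep :
        (if max_len ≤ (((pvWin items max_len t ++ [x]).length : Nat) : Int)
          then PySem.List.slice (pvWin items max_len t ++ [x]) (some 1) none
          else pvWin items max_len t ++ [x]) = pvWin items max_len (t + 1) := by
      rw [hlenw]
      by_cases hc : max_len.toNat ≤ t + 1
      · rw [if_pos (by push_cast; omega)]
        rw [PySem.List.slice_from_one, ← List.drop_one, hwin1]
        rw [List.drop_take, List.drop_drop]
        unfold pvWin
        have e1 : t - (max_len.toNat - 1) + 1 = t + 1 - (max_len.toNat - 1) := by omega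
        have e2 : t + 1 - (t - (max_len.toNat - 1)) - 1 = t + 1 - (t + 1 - (max_len.toNat - 1)) := by omega
        rw [e1, e2]
      · rw [if_neg (by push_cast; omega)]
        rw [hwin1]
        unfold pvWin
        have e1 : t - (max_len.toNat - 1) = t + 1 - (max_len.toNat - 1) := by omega
        rw [e1]
    simp only []
    rw [hwinstep]
    rw [ih (t + 1) _ (by omega) hdrop1]
    -- peel the head of the pyRange on the right
    have hcons := PySem.List.pyRange_one_cons (a := (t : Int)) (b := (items.length : Int)) (by exact_mod_cast htlt)
    have hcast : ((t : Int)) + 1 = (((t + 1 : Nat)) : Int) := by push_cast; ring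
    rw [hcons, hcast]
    simp only [List.map_cons]
    have hgetD : PySem.List.pyGetD items ((t : Nat) : Int) 0 = x := by
      rw [PySem.List.pyGetD_natCast]
      simp [List.getD, hget, htlt]
    rw [pvWin_eq_slice items max_len hml t, hgetD]
    simp [List.append_assoc]

-- per-session equality for 1 ≤ max_len
theorem pvStep_eq (max_len : Int) (hml : 1 ≤ max_len)
    (acc : List (List Int) × List (List Int) × List Int) (seq : Int × List Int) :
    pvStepA max_len acc seq = pvStepB max_len acc seq := by
  unfold pvStepA pvStepB
  simp only [pvFoldTriple]
  -- A side: fuse the two chunks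
  have k1 := pvKeyA max_len hml seq.2 (fun a b => PySem.List.slice seq.2 (some a) (some b))
  have k2 := pvKeyA max_len hml seq.2 (fun _ b => [PySem.List.pyGetD seq.2 b 0])
  have k3 := pvKeyA max_len hml seq.2 (fun _ _ => seq.1)
  -- B side: the invariant at t = 1
  have hw0 : (if 1 < max_len then PySem.List.slice seq.2 none (some 1) else [])
      = pvWin seq.2 max_len 1 := by
    unfold pvWin
    by_cases h : 1 < max_len
    · rw [if_pos h, PySem.List.slice_to seq.2 (by omega)]
      have e1 : 1 - (max_len.toNat - 1) = 0 := by omega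
      have e2 : ((1 : Int)).toNat = 1 := by omega
      rw [e1, e2]
      simp
    · rw [if_neg h]
      have hm1 : max_len.toNat - 1 = 0 := by omega
      rw [hm1]
      simp
  have hfrom : PySem.List.slice seq.2 (some 1) none = seq.2.drop 1 := by
    rw [PySem.List.slice_from_one, List.drop_one]
  rw [hw0, hfrom]
  have hinner := pvInnerB max_len hml seq.1 seq.2 (seq.2.drop 1) 1 acc (by omega) rfl
  have hone : ((1 : Nat) : Int) = (1 : Int) := by norm_num
  rw [hone] at hinner
  rw [hinner]
  by_cases h : max_len < (seq.2.length : Int)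
  · rw [if_pos h] at k1 k2 k3 ⊢
    simp only [Prod.mk.injEq]
    refine ⟨?_, ?_, ?_⟩
    · rw [List.append_assoc]; exact congrArg _ k1
    · rw [List.append_assoc]; exact congrArg _ k2
    · rw [List.append_assoc]; exact congrArg _ k3
  · rw [if_neg h] at k1 k2 k3 ⊢
    rw [List.append_nil] at k1 k2 k3
    simp only [Prod.mk.injEq]
    exact ⟨congrArg _ k1, congrArg _ k2, congrArg _ k3⟩

-- A does nothing on an empty session when max_len = 0
theorem pvStepA_zero_nil (acc : List (List Int) × List (List Int) × List Int) (s : Int) :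
    pvStepA 0 acc (s, []) = acc := by
  simp [pvStepA]

-- A's sess component only grows
theorem pvStepA_sess (max_len : Int) (acc : List (List Int) × List (List Int) × List Int)
    (seq : Int × List Int) : ∃ d, (pvStepA max_len acc seq).2.2 = acc.2.2 ++ d := by
  unfold pvStepA
  by_cases h : max_len < (seq.2.length : Int)
  · rw [if_pos h]
    simp only [pvFoldTriple]
    exact ⟨_, by rw [List.append_assoc]⟩
  · rw [if_neg h]
    simp only [pvFoldTriple]
    exact ⟨_, rfl⟩

theorem pvFoldA_sess (max_len : Int) :
    ∀ (l : List (Int × List Int)) (acc : List (List Int) × List (List Int) × List Int),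
      ∃ d, (List.foldl (pvStepA max_len) acc l).2.2 = acc.2.2 ++ d := by
  intro l
  induction l with
  | nil => intro acc; exact ⟨[], by simp⟩
  | cons p ps ih =>
    intro acc
    obtain ⟨d1, hd1⟩ := pvStepA_sess max_len acc p
    obtain ⟨d2, hd2⟩ := ih (pvStepA max_len acc p)
    exact ⟨d1 ++ d2, by rw [List.foldl_cons, hd2, hd1, List.append_assoc]⟩

-- on a nonempty session with max_len ≤ 0 (and no raise), A emits at least one pair
theorem pvStepA_sess_ne (max_len : Int) (hml : max_len ≤ 0)
    (acc : List (List Int) × List (List Int) × List Int) (seq : Int × List Int)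
    (hne : seq.2 ≠ []) :
    ∃ d, (pvStepA max_len acc seq).2.2 = acc.2.2 ++ d ∧ d ≠ [] := by
  have hlen : 0 < (seq.2.length : Int) := by
    have := List.length_pos_of_ne_nil hne
    exact_mod_cast this
  unfold pvStepA
  rw [if_pos (by omega)]
  simp only [pvFoldTriple]
  refine ⟨_, by rw [List.append_assoc], ?_⟩
  intro hcontra
  rcases List.append_eq_nil_iff.mp hcontra with ⟨-, h2⟩
  have : (PySem.List.pyRange max_len (seq.2.length : Int) 1).length = 0 := by
    have := congrArg List.length h2
    simpa using this
  rw [PySem.List.length_pyRange_one] at this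
  omega

-- ===== VERDICT (by name: the statement is the Claim_ definition above) =====
theorem build_seqs_spec : Claim_unchanged_build_seqs := by
  intro seqs max_len _ hpre
  unfold Spec_build_seqs
  intro hnD
  by_cases hml : 1 ≤ max_len
  · unfold build_seqs build_seqs_alt
    rw [if_neg (by omega)]
    have : pvStepA max_len = pvStepB max_len := by
      funext acc seq; exact pvStep_eq max_len hml acc seq
    rw [this]
  · -- max_len ≤ 0 and no nonempty session: both sides are ([], [], [])
    have hempty : ∀ p ∈ seqs, p.2 = [] := by
      intro p hp
      by_contra h
      exact hnD ⟨by omega, p, hp, h⟩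
    unfold build_seqs build_seqs_alt
    rw [if_pos (by omega)]
    rcases seqs with _ | ⟨q, qs⟩
    · simp
    · have hq : q.2 = [] := hempty q (by simp)
      have hml0 : max_len = 0 := by
        have := hpre q (by simp)
        rw [hq] at this
        simp at this
        omega
      subst hml0
      have : ∀ l : List (Int × List Int), (∀ p ∈ l, p.2 = []) →
          ∀ acc, l.foldl (pvStepA 0) acc = acc := by
        intro l
        induction l with
        | nil => intro _ acc; simp
        | cons p ps ih =>
          intro hall acc
          rw [List.foldl_cons]
          have hp : p.2 = [] := hall p (by simp)
          have hstep : pvStepA 0 acc p = acc := by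
            have : p = (p.1, ([] : List Int)) := by
              cases p; simp_all
            rw [this]
            exact pvStepA_zero_nil acc p.1
          rw [hstep]
          exact ih (fun x hx => hall x (by simp [hx])) acc
      exact this (q :: qs) hempty ([], [], [])

theorem build_seqs_changed : Claim_changed_build_seqs := by
  unfold Claim_changed_build_seqs; decide

theorem build_seqs_tight : Claim_exact_build_seqs := by
  intro seqs max_len _ hpre hD
  obtain ⟨hml, p, hp, hne⟩ := hD
  unfold build_seqs build_seqs_alt
  rw [if_pos hml]
  intro hcontra
  obtain ⟨l1, l2, rfl⟩ := List.append_of_mem hp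
  rw [List.foldl_append, List.foldl_cons] at hcontra
  obtain ⟨d1, hd1, hdne⟩ := pvStepA_sess_ne max_len hml (l1.foldl (pvStepA max_len) ([], [], [])) p hne
  obtain ⟨d2, hd2⟩ := pvFoldA_sess max_len l2 (pvStepA max_len (l1.foldl (pvStepA max_len) ([], [], [])) p)
  have hsess := congrArg (fun x : List (List Int) × List (List Int) × List Int => x.2.2) hcontra
  simp only at hsess
  rw [hd2, hd1] at hsess
  rcases List.append_eq_nil_iff.mp hsess with ⟨h2, -⟩
  rcases List.append_eq_nil_iff.mp h2 with ⟨-, h3⟩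
  exact hdne h3
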